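-- pv_equiv track=rewrite | github.com/metrasynth/radiant-voices | src/python/genrv/tools/generate.py | enumname
-- ===== SOURCE A (Python) =====
-- def enumname(ekey: str) -> str:
--     ekey = str(ekey).replace("/", "_div_")
--     ekey = ekey.replace("*", "_mul_")
--     ekey = ekey.replace(".", "_")
--     ekey = ekey.replace("+", "_plus_")
--     ekey = ekey.replace("-", "_neg_")
--     ekey = ekey.replace("^", "_pow_")
--     if ekey[0].isdigit():
--         ekey = f"_{ekey}"
--     while "__" in ekey:
--         ekey = ekey.replace("__", "_")
--     return ekey
-- ===== SOURCE B (Python) =====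
-- def _expand(c):
--     if c == "/":
--         return "_div_"
--     if c == "*":
--         return "_mul_"
--     if c == ".":
--         return "_"
--     if c == "+":
--         return "_plus_"
--     if c == "-":
--         return "_neg_"
--     if c == "^":
--         return "_pow_"
--     return c
--
--
-- def enumname(ekey: str) -> str:
--     ekey = str(ekey)
--     buf = ["_"] if ekey[0].isdigit() else []
--     for ch in ekey:
--         for c in _expand(ch):
--             if c != "_" or not buf or buf[-1] != "_":
--                 buf.append(c)
--     return "".join(buf)
-- ===== Notes on version B (the rewrite author's own statement) =====
-- stated objective: simpler
-- what changed: B builds the result in a single left-to-right pass, expanding each character via a small table and inline-dropping an underscore that would immediately follow an emitted underscore, instead of A's six sequential global str.replace passes followed by a repeated global double-underscore collapse loop.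
import Mathlib
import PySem

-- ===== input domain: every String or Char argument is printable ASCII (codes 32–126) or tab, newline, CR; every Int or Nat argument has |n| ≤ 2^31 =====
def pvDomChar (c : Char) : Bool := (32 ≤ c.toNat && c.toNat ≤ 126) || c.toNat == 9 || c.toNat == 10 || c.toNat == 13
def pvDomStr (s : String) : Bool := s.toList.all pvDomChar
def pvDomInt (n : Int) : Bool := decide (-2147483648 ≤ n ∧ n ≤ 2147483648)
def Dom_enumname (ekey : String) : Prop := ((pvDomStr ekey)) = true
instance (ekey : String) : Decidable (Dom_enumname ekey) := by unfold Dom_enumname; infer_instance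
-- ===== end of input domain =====

-- B builds the sanitized name in ONE left-to-right pass (per-char expansion with inline
-- collapsing of consecutive underscores) instead of A's six global replaces plus a
-- repeated global double-underscore collapse loop; objective: simpler decomposition.

-- ===== PORT A =====
-- A's while-loop collapsing double underscores, ported with fuel; fuel = length
-- suffices because each replace strictly shortens the string while it loops.
def collapseA : Nat → List Char → List Char
  | 0, s => s
  | fuel + 1, s =>
    if PySem.Chars.isIn ['_', '_'] s then
      collapseA fuel (PySem.Chars.replace s ['_', '_'] ['_'])
    else s

def enumname (ekey : String) : String :=
  let r1 := PySem.Chars.replace ekey.toList ['/'] ['_', 'd', 'i', 'v', '_']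
  let r2 := PySem.Chars.replace r1 ['*'] ['_', 'm', 'u', 'l', '_']
  let r3 := PySem.Chars.replace r2 ['.'] ['_']
  let r4 := PySem.Chars.replace r3 ['+'] ['_', 'p', 'l', 'u', 's', '_']
  let r5 := PySem.Chars.replace r4 ['-'] ['_', 'n', 'e', 'g', '_']
  let r6 := PySem.Chars.replace r5 ['^'] ['_', 'p', 'o', 'w', '_']
  let r7 := match PySem.List.pyGet? r6 0 with
    | some d => if PySem.Chars.isdigit d then '_' :: r6 else r6
    | none => r6  -- Python raises IndexError here (empty input); excluded by Pre_
  String.ofList (collapseA r7.length r7)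

-- ===== PORT B =====
def expandB (c : Char) : List Char :=
  if c = '/' then ['_', 'd', 'i', 'v', '_']
  else if c = '*' then ['_', 'm', 'u', 'l', '_']
  else if c = '.' then ['_']
  else if c = '+' then ['_', 'p', 'l', 'u', 's', '_']
  else if c = '-' then ['_', 'n', 'e', 'g', '_']
  else if c = '^' then ['_', 'p', 'o', 'w', '_']
  else [c]

def enumname_alt (ekey : String) : String :=
  let s := ekey.toList
  let buf0 : List Char := match PySem.List.pyGet? s 0 with
    | some c => if PySem.Chars.isdigit c then ['_'] else []
    | none => []  -- Python raises IndexError here (empty input); excluded by Pre_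
  let buf := s.foldl (fun buf ch =>
    (expandB ch).foldl (fun buf c =>
      if c ≠ '_' ∨ buf = [] ∨ PySem.List.pyGet? buf (-1) ≠ some '_' then buf ++ [c]
      else buf) buf) buf0
  String.ofList buf

-- ===== PRECONDITION & SPEC =====
-- Pre_ excludes only the empty string, on which A (and B) raise IndexError at ekey[0].
def Pre_enumname (ekey : String) : Prop := ekey ≠ ""
instance (ekey : String) : Decidable (Pre_enumname ekey) := by unfold Pre_enumname; infer_instance
def pvWitness_enumname : String := "3a+b"

def Spec_enumname (ekey : String) (out : String) : Prop := out = enumname_alt ekey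
instance (ekey : String) (out : String) : Decidable (Spec_enumname ekey out) := by unfold Spec_enumname; infer_instance

-- ===== CLAIM (what is proved, stated in full; the proofs are below) =====
def Claim_equal_enumname : Prop := ∀ (ekey : String), Dom_enumname ekey → Pre_enumname ekey → Spec_enumname ekey (enumname ekey)

-- ===== LEMMAS AND PROOFS =====

def sqU : List Char → List Char
  | [] => []
  | c :: t => if c = '_' then '_' :: sqU (t.dropWhile (· == '_')) else c :: sqU t
termination_by l => l.length
decreasing_by
  · have := List.length_dropWhile_le (· == '_') t
    simp only [List.length_cons]; omega
  · simp

def rep2 : List Char → List Char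
  | [] => []
  | c :: t => if c = '_' ∧ t.head? = some '_' then '_' :: rep2 t.tail else c :: rep2 t
termination_by l => l.length
decreasing_by
  · simp only [List.length_cons, List.length_tail]; omega
  · simp

def sqF : Bool → List Char → List Char
  | _, [] => []
  | b, c :: t => if c = '_' then (if b then sqF true t else '_' :: sqF true t) else c :: sqF false t

theorem rep2_nil : rep2 [] = [] := by rw [rep2.eq_def]

theorem rep2_cons (c : Char) (t : List Char) :
    rep2 (c :: t) = if c = '_' ∧ t.head? = some '_' then '_' :: rep2 t.tail else c :: rep2 t := by
  rw [rep2]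

theorem sqU_nil : sqU [] = [] := by rw [sqU.eq_def]

theorem sqU_cons (c : Char) (t : List Char) :
    sqU (c :: t) = if c = '_' then '_' :: sqU (t.dropWhile (· == '_')) else c :: sqU t := by
  rw [sqU]

theorem go_single (o : Char) (new : List Char) :
    ∀ (s : List Char) (acc : List Char) (fuel : Nat), s.length ≤ fuel →
      PySem.Chars.replace.go [o] new fuel s acc
        = acc.reverse ++ s.flatMap (fun c => if c = o then new else [c]) := by
  intro s
  induction s with
  | nil =>
    intro acc fuel _
    cases fuel <;> simp [PySem.Chars.replace.go]
  | cons c t ih =>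
    intro acc fuel hf
    cases fuel with
    | zero => simp at hf
    | succ fuel =>
      have hstep : PySem.Chars.replace.go [o] new (fuel+1) (c :: t) acc =
          if [o].isPrefixOf (c :: t) then
            PySem.Chars.replace.go [o] new fuel (List.drop 1 (c :: t)) (new.reverse ++ acc)
          else PySem.Chars.replace.go [o] new fuel t (c :: acc) := rfl
      rw [hstep]
      by_cases h : c = o
      · have hp : [o].isPrefixOf (c :: t) = true := by simp [List.isPrefixOf, h]
        rw [if_pos hp]
        simp only [List.drop_succ_cons, List.drop_zero]
        rw [ih _ fuel (by simpa using Nat.le_of_succ_le_succ hf)]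
        simp [h]
      · have hp : [o].isPrefixOf (c :: t) = false := by
          simp [List.isPrefixOf]
          exact fun hh => absurd hh.symm (by simpa using h)
        rw [if_neg (by simp [hp])]
        rw [ih _ fuel (by simpa using Nat.le_of_succ_le_succ hf)]
        simp [h]

theorem replace_single (s : List Char) (o : Char) (new : List Char) :
    PySem.Chars.replace s [o] new = s.flatMap (fun c => if c = o then new else [c]) := by
  rw [PySem.Chars.replace]
  simp only [List.isEmpty, if_neg]
  · exact go_single o new s [] s.length le_rfl

theorem go_rep2 :
    ∀ (fuel : Nat) (s acc : List Char), s.length ≤ fuel →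
      PySem.Chars.replace.go ['_', '_'] ['_'] fuel s acc = acc.reverse ++ rep2 s := by
  intro fuel
  induction fuel with
  | zero =>
    intro s acc h
    have : s = [] := by cases s <;> simp_all
    subst this
    simp [PySem.Chars.replace.go, rep2]
  | succ fuel ih =>
    intro s acc h
    cases s with
    | nil => simp [PySem.Chars.replace.go, rep2]
    | cons c t =>
      have hstep : PySem.Chars.replace.go ['_','_'] ['_'] (fuel+1) (c :: t) acc =
          if ['_','_'].isPrefixOf (c :: t) then
            PySem.Chars.replace.go ['_','_'] ['_'] fuel (List.drop 2 (c :: t)) (['_'] ++ acc)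
          else PySem.Chars.replace.go ['_','_'] ['_'] fuel t (c :: acc) := rfl
      rw [hstep]
      by_cases hc : c = '_' ∧ t.head? = some '_'
      · obtain ⟨hc1, hc2⟩ := hc
        obtain ⟨u, ht⟩ : ∃ u, t = '_' :: u := by
          cases t with
          | nil => simp at hc2
          | cons d u => exact ⟨u, by simp_all⟩
        subst ht hc1
        rw [if_pos (by simp [List.isPrefixOf])]
        simp only [List.drop_succ_cons, List.drop_zero]
        rw [ih u _ (by simp at h ⊢; omega)]
        rw [rep2]
        simp
      · have hp : ['_','_'].isPrefixOf (c :: t) = false := by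
          cases t with
          | nil => simp [List.isPrefixOf]
          | cons d u =>
            simp only [List.head?_cons] at hc
            simp only [not_and] at hc
            simp only [List.isPrefixOf, List.isPrefixOf_nil_left, Bool.and_true, beq_iff_eq,
              Bool.and_eq_false_iff, decide_eq_false_iff_not]
            by_cases h1 : c = '_'
            · right
              simp only [beq_eq_false_iff_ne, ne_eq]
              intro hd
              exact hc h1 (by rw [hd])
            · left
              simp only [beq_eq_false_iff_ne, ne_eq]
              exact fun hh => h1 hh.symm
        rw [if_neg (by simp [hp])]
        rw [ih t _ (by simp at h ⊢; omega)]
        rw [rep2, if_neg hc]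
        simp

theorem replace2_eq (s : List Char) :
    PySem.Chars.replace s ['_', '_'] ['_'] = rep2 s := by
  rw [PySem.Chars.replace]
  simp only [List.isEmpty]
  exact go_rep2 s.length s [] le_rfl

theorem dropWhile_rep2 :
    ∀ (n : Nat) (s : List Char), s.length ≤ n →
      (rep2 s).dropWhile (· == '_') = rep2 (s.dropWhile (· == '_')) := by
  intro n
  induction n with
  | zero =>
    intro s h
    have : s = [] := by cases s <;> simp_all
    subst this; simp [rep2_nil]
  | succ n ih =>
    intro s h
    match s with
    | [] => simp [rep2_nil]
    | c :: t =>
      by_cases hc : c = '_'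
      · subst hc
        match t with
        | [] => simp [rep2_cons, rep2_nil, List.dropWhile_cons]
        | d :: u =>
          by_cases hd : d = '_'
          · subst hd
            rw [rep2_cons, if_pos (by simp)]
            simp only [List.tail_cons]
            have h2 : List.dropWhile (· == '_') ('_' :: '_' :: u) = List.dropWhile (· == '_') u := by
              simp [List.dropWhile_cons]
            have h1 : List.dropWhile (· == '_') ('_' :: rep2 u) = List.dropWhile (· == '_') (rep2 u) := by
              simp [List.dropWhile_cons]
            rw [h1, h2]
            exact ih u (by simp at h ⊢; omega)
          · rw [rep2_cons, if_neg (by simp [hd])]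
            have h2 : List.dropWhile (· == '_') ('_' :: d :: u) = d :: u := by
              simp [List.dropWhile_cons, hd]
            have h3 : rep2 (d :: u) = d :: rep2 u := by
              rw [rep2_cons, if_neg (by simp [hd])]
            rw [h2, h3]
            simp [List.dropWhile_cons, hd]
      · rw [rep2_cons, if_neg (by simp [hc])]
        simp only [List.dropWhile_cons, beq_iff_eq, hc, if_false]
        rw [rep2_cons, if_neg (by simp [hc])]

theorem sqU_rep2 :
    ∀ (n : Nat) (s : List Char), s.length ≤ n → sqU (rep2 s) = sqU s := by
  intro n
  induction n with
  | zero =>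
    intro s h
    have : s = [] := by cases s <;> simp_all
    subst this; rw [rep2_nil]
  | succ n ih =>
    intro s h
    match s with
    | [] => rw [rep2_nil]
    | c :: t =>
      by_cases hc : c = '_'
      · subst hc
        by_cases hcond : ('_' : Char) = '_' ∧ t.head? = some '_'
        · obtain ⟨u, ht⟩ : ∃ u, t = '_' :: u := by
            cases t with
            | nil => simp at hcond
            | cons d v => exact ⟨v, by simp_all⟩
          subst ht
          rw [rep2_cons, if_pos hcond]
          simp only [List.tail_cons]
          rw [sqU_cons, if_pos rfl, sqU_cons, if_pos rfl]
          congr 1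
          rw [dropWhile_rep2 n u (by simp at h ⊢; omega)]
          have h2 : List.dropWhile (· == '_') ('_' :: u) = List.dropWhile (· == '_') u := by
            simp [List.dropWhile_cons]
          rw [h2]
          have hlen := List.length_dropWhile_le (· == '_') u
          exact ih _ (by simp at h ⊢; omega)
        · rw [rep2_cons, if_neg hcond]
          rw [sqU_cons, if_pos rfl, sqU_cons, if_pos rfl]
          congr 1
          rw [dropWhile_rep2 n t (by simp at h ⊢; omega)]
          have hlen := List.length_dropWhile_le (· == '_') t
          exact ih _ (by simp at h ⊢; omega)
      · rw [rep2_cons, if_neg (by simp [hc])]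
        rw [sqU_cons, if_neg hc, sqU_cons, if_neg hc]
        congr 1
        exact ih t (by simp at h ⊢; omega)

theorem sqU_self : ∀ (n : Nat) (s : List Char), s.length ≤ n →
    ¬ (['_', '_'] <:+: s) → sqU s = s := by
  intro n
  induction n with
  | zero =>
    intro s h _
    have : s = [] := by cases s <;> simp_all
    subst this; exact sqU_nil
  | succ n ih =>
    intro s h hinf
    match s with
    | [] => exact sqU_nil
    | c :: t =>
      have htinf : ¬ (['_', '_'] <:+: t) := fun hh => hinf (List.infix_cons_iff.mpr (Or.inr hh))
      by_cases hc : c = '_'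
      · subst hc
        have hhd : t.dropWhile (· == '_') = t := by
          cases t with
          | nil => rfl
          | cons d u =>
            have hd : d ≠ '_' := by
              intro hd; subst hd
              exact hinf (List.infix_cons_iff.mpr (Or.inl ⟨u, rfl⟩))
            simp [List.dropWhile_cons, hd]
        rw [sqU_cons, if_pos rfl, hhd, ih t (by simp at h ⊢; omega) htinf]
      · rw [sqU_cons, if_neg hc, ih t (by simp at h ⊢; omega) htinf]

theorem rep2_len_le : ∀ (n : Nat) (s : List Char), s.length ≤ n → (rep2 s).length ≤ s.length := by
  intro n
  induction n with
  | zero =>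
    intro s h
    have : s = [] := by cases s <;> simp_all
    subst this; simp [rep2_nil]
  | succ n ih =>
    intro s h
    match s with
    | [] => simp [rep2_nil]
    | c :: t =>
      by_cases hcond : c = '_' ∧ t.head? = some '_'
      · obtain ⟨u, ht⟩ : ∃ u, t = '_' :: u := by
          cases t with
          | nil => simp at hcond
          | cons d v => exact ⟨v, by obtain ⟨h1, h2⟩ := hcond; simp only [List.head?_cons, Option.some.injEq] at h2; rw [h2]⟩
        subst ht
        rw [rep2_cons, if_pos hcond]
        have := ih u (by simp at h ⊢; omega)
        simp only [List.tail_cons, List.length_cons] at this ⊢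
        omega
      · rw [rep2_cons, if_neg hcond]
        have := ih t (by simp at h ⊢; omega)
        simp only [List.length_cons]
        omega

theorem rep2_len_lt : ∀ (n : Nat) (s : List Char), s.length ≤ n →
    ['_', '_'] <:+: s → (rep2 s).length < s.length := by
  intro n
  induction n with
  | zero =>
    intro s h hinf
    have : s = [] := by cases s <;> simp_all
    subst this
    simp at hinf
  | succ n ih =>
    intro s h hinf
    match s with
    | [] => simp at hinf
    | c :: t =>
      by_cases hcond : c = '_' ∧ t.head? = some '_'
      · obtain ⟨u, ht⟩ : ∃ u, t = '_' :: u := by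
          cases t with
          | nil => simp at hcond
          | cons d v => exact ⟨v, by obtain ⟨h1, h2⟩ := hcond; simp only [List.head?_cons, Option.some.injEq] at h2; rw [h2]⟩
        subst ht
        rw [rep2_cons, if_pos hcond]
        have := rep2_len_le (n+1) u (by simp at h ⊢; omega)
        simp only [List.tail_cons, List.length_cons]
        omega
      · rw [rep2_cons, if_neg hcond]
        have htinf : ['_', '_'] <:+: t := by
          rcases List.infix_cons_iff.mp hinf with hp | hi
          · exfalso
            obtain ⟨l, hl⟩ := hp
            apply hcond
            cases t with
            | nil => have := congrArg List.length hl; simp at this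
            | cons d v =>
              simp only [List.cons_append, List.nil_append, List.cons.injEq] at hl
              obtain ⟨h1, h2, _⟩ := hl
              exact ⟨h1.symm, by simp [← h2]⟩
          · exact hi
        have := ih t (by simp at h ⊢; omega) htinf
        simp only [List.length_cons]
        omega

theorem collapseA_eq :
    ∀ (fuel : Nat) (s : List Char), s.length ≤ fuel → collapseA fuel s = sqU s := by
  intro fuel
  induction fuel with
  | zero =>
    intro s h
    have : s = [] := by cases s <;> simp_all
    subst this; rw [sqU_nil]; rfl
  | succ fuel ih =>
    intro s h
    rw [collapseA]
    by_cases hin : PySem.Chars.isIn ['_', '_'] s = true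
    · rw [if_pos hin, replace2_eq]
      have hinf := (PySem.Chars.isIn_iff_infix _ _).mp hin
      have hlt := rep2_len_lt s.length s le_rfl hinf
      rw [ih (rep2 s) (by omega)]
      exact sqU_rep2 s.length s le_rfl
    · rw [if_neg hin]
      have hninf := (PySem.Chars.isIn_eq_false_iff _ _).mp (by simpa using hin)
      exact (sqU_self s.length s le_rfl hninf).symm

theorem sqF_eq :
    ∀ (n : Nat) (l : List Char), l.length ≤ n →
      sqF false l = sqU l ∧ sqF true l = sqU (l.dropWhile (· == '_')) := by
  intro n
  induction n with
  | zero =>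
    intro l h
    have : l = [] := by cases l <;> simp_all
    subst this
    exact ⟨sqU_nil.symm, sqU_nil.symm⟩
  | succ n ih =>
    intro l h
    match l with
    | [] => exact ⟨sqU_nil.symm, sqU_nil.symm⟩
    | c :: t =>
      have ht := ih t (by simp at h ⊢; omega)
      have hdlen := List.length_dropWhile_le (· == '_') t
      have htd := ih (t.dropWhile (· == '_')) (by simp at h ⊢; omega)
      by_cases hc : c = '_'
      · subst hc
        constructor
        · show (if ('_' : Char) = '_' then '_' :: sqF true t else _) = _
          rw [if_pos rfl, sqU_cons, if_pos rfl, ht.2]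
        · show (if ('_' : Char) = '_' then (if true = true then sqF true t else _) else _) = _
          rw [if_pos rfl, if_pos rfl, ht.2]
          simp [List.dropWhile_cons]
      · constructor
        · show (if c = '_' then _ else c :: sqF false t) = _
          rw [if_neg hc, sqU_cons, if_neg hc, ht.1]
        · show (if c = '_' then _ else c :: sqF false t) = _
          rw [if_neg hc, ht.1]
          have : List.dropWhile (· == '_') (c :: t) = c :: t := by
            simp [List.dropWhile_cons, hc]
          rw [this, sqU_cons, if_neg hc]

theorem pyGet?_neg_one (l : List Char) : PySem.List.pyGet? l (-1) = l.getLast? := by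
  cases l with
  | nil => rfl
  | cons c t => simp [PySem.List.pyGet?, PySem.List.pyIdx?, List.getLast?_eq_getElem?]

theorem pyGet?_cons_zero (c : Char) (l : List Char) :
    PySem.List.pyGet? (c :: l) 0 = some c := by
  simp [PySem.List.pyGet?, PySem.List.pyIdx?]

theorem foldl_inner :
    ∀ (l : List Char) (buf : List Char),
      l.foldl (fun buf c =>
        if c ≠ '_' ∨ buf = [] ∨ PySem.List.pyGet? buf (-1) ≠ some '_' then buf ++ [c]
        else buf) buf
      = buf ++ sqF (decide (buf.getLast? = some '_')) l := by
  intro l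
  induction l with
  | nil => intro buf; simp [sqF]
  | cons c t ih =>
    intro buf
    rw [List.foldl_cons]
    by_cases hc : c = '_'
    · subst hc
      by_cases hl : buf.getLast? = some '_'
      · have hbne : buf ≠ [] := by intro h; subst h; simp at hl
        have hstep : (if ('_' : Char) ≠ '_' ∨ buf = [] ∨ PySem.List.pyGet? buf (-1) ≠ some '_' then buf ++ ['_'] else buf) = buf := by
          rw [if_neg]
          push_neg
          exact ⟨rfl, hbne, by rw [pyGet?_neg_one, hl]⟩
        rw [hstep, ih, hl]
        simp [sqF]
      · have hstep : (if ('_' : Char) ≠ '_' ∨ buf = [] ∨ PySem.List.pyGet? buf (-1) ≠ some '_' then buf ++ ['_'] else buf) = buf ++ ['_'] := by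
          by_cases hbe : buf = []
          · rw [if_pos (Or.inr (Or.inl hbe))]
          · rw [if_pos (Or.inr (Or.inr (by rw [pyGet?_neg_one]; exact hl)))]
        rw [hstep, ih, List.getLast?_concat]
        simp [sqF, hl]
    · have hstep : (if c ≠ '_' ∨ buf = [] ∨ PySem.List.pyGet? buf (-1) ≠ some '_' then buf ++ [c] else buf) = buf ++ [c] := by
        rw [if_pos (Or.inl hc)]
      rw [hstep, ih, List.getLast?_concat]
      have h2 : (decide (some c = some ('_' : Char))) = false := by
        simp [hc]
      rw [h2]
      cases hb : decide (buf.getLast? = some '_') <;> simp [sqF, hc]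

theorem comp_eq (c : Char) :
    ((if c = '/' then ['_', 'd', 'i', 'v', '_'] else [c]).flatMap (fun c2 =>
      (if c2 = '*' then ['_', 'm', 'u', 'l', '_'] else [c2]).flatMap (fun c3 =>
        (if c3 = '.' then ['_'] else [c3]).flatMap (fun c4 =>
          (if c4 = '+' then ['_', 'p', 'l', 'u', 's', '_'] else [c4]).flatMap (fun c5 =>
            (if c5 = '-' then ['_', 'n', 'e', 'g', '_'] else [c5]).flatMap (fun c6 =>
              if c6 = '^' then ['_', 'p', 'o', 'w', '_'] else [c6]))))))
      = expandB c := by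
  by_cases h1 : c = '/'
  · subst h1; decide
  by_cases h2 : c = '*'
  · subst h2; decide
  by_cases h3 : c = '.'
  · subst h3; decide
  by_cases h4 : c = '+'
  · subst h4; decide
  by_cases h5 : c = '-'
  · subst h5; decide
  by_cases h6 : c = '^'
  · subst h6; decide
  simp [expandB, h1, h2, h3, h4, h5, h6]

theorem chain_eq (s : List Char) :
    PySem.Chars.replace
      (PySem.Chars.replace
        (PySem.Chars.replace
          (PySem.Chars.replace
            (PySem.Chars.replace
              (PySem.Chars.replace s ['/'] ['_', 'd', 'i', 'v', '_'])
              ['*'] ['_', 'm', 'u', 'l', '_'])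
            ['.'] ['_'])
          ['+'] ['_', 'p', 'l', 'u', 's', '_'])
        ['-'] ['_', 'n', 'e', 'g', '_'])
      ['^'] ['_', 'p', 'o', 'w', '_']
      = s.flatMap expandB := by
  rw [replace_single, replace_single, replace_single, replace_single, replace_single,
    replace_single]
  simp only [List.flatMap_assoc]
  simp only [comp_eq]

theorem first_digit (c : Char) (r : List Char) :
    ∃ d, PySem.List.pyGet? (expandB c ++ r) 0 = some d ∧
      PySem.Chars.isdigit d = PySem.Chars.isdigit c := by
  by_cases h1 : c = '/'
  · exact ⟨'_', by subst h1; exact pyGet?_cons_zero _ _, by subst h1; decide⟩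
  by_cases h2 : c = '*'
  · exact ⟨'_', by subst h2; exact pyGet?_cons_zero _ _, by subst h2; decide⟩
  by_cases h3 : c = '.'
  · exact ⟨'_', by subst h3; exact pyGet?_cons_zero _ _, by subst h3; decide⟩
  by_cases h4 : c = '+'
  · exact ⟨'_', by subst h4; exact pyGet?_cons_zero _ _, by subst h4; decide⟩
  by_cases h5 : c = '-'
  · exact ⟨'_', by subst h5; exact pyGet?_cons_zero _ _, by subst h5; decide⟩
  by_cases h6 : c = '^'
  · exact ⟨'_', by subst h6; exact pyGet?_cons_zero _ _, by subst h6; decide⟩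
  have he : expandB c = [c] := by simp [expandB, h1, h2, h3, h4, h5, h6]
  exact ⟨c, by rw [he]; exact pyGet?_cons_zero _ _, rfl⟩

-- ===== VERDICT (by name: the statement is the Claim_ definition above) =====
theorem enumname_main (c : Char) (t : List Char) :
    enumname (String.ofList (c :: t)) = enumname_alt (String.ofList (c :: t)) := by
  simp only [enumname, enumname_alt]
  have hl : (String.ofList (c :: t)).toList = c :: t := String.toList_ofList ..
  rw [hl, chain_eq, List.flatMap_cons]
  obtain ⟨d, hd, hdig⟩ := first_digit c (t.flatMap expandB)
  rw [hd, pyGet?_cons_zero]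
  simp only []
  rw [hdig]
  rw [← List.foldl_flatMap, List.flatMap_cons, foldl_inner]
  cases hdi : PySem.Chars.isdigit c with
  | true =>
    simp only [reduceIte]
    rw [collapseA_eq _ _ le_rfl, sqU_cons, if_pos rfl]
    simp [(sqF_eq (expandB c ++ t.flatMap expandB).length _ le_rfl).2]
  | false =>
    simp only [Bool.false_eq_true, reduceIte]
    rw [collapseA_eq _ _ le_rfl]
    simp only [List.getLast?_nil, List.nil_append]
    simp [(sqF_eq (expandB c ++ t.flatMap expandB).length _ le_rfl).1]

theorem enumname_spec : Claim_equal_enumname := by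
  unfold Claim_equal_enumname
  intro ekey _ hpre
  unfold Spec_enumname
  obtain ⟨c, t, hct⟩ : ∃ c t, ekey.toList = c :: t := by
    cases hcl : ekey.toList with
    | nil =>
      exfalso
      exact hpre (String.toList_inj.mp (by rw [hcl]; rfl))
    | cons c t => exact ⟨c, t, rfl⟩
  have hek : ekey = String.ofList (c :: t) := String.toList_inj.mp (by rw [hct, String.toList_ofList])
  rw [hek]
  exact enumname_main c t
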